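-- pv_equiv track=rewrite | github.com/0xAmitSec/VulnScan-BurpPro | modules/vulns/info_disclosure/scanner.py | _classify_sensitive_file
-- ===== SOURCE A (Python) =====
-- def _classify_sensitive_file(path: str, content: str):
--     if ".git" in path:
--         if "ref:" in content or "[core]" in content or "repositoryformatversion" in content:
--             return "Critical", ".git directory exposed — full source code dump possible via git-dumper"
--     if ".env" in path:
--         if any(k in content for k in ["DB_", "APP_KEY", "SECRET", "PASSWORD", "TOKEN", "AWS_"]):
--             return "Critical", ".env file exposed — credentials and secrets visible"
--         return "High", ".env file accessible"
--     if path in ("/phpinfo.php", "/info.php"):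
--         if "PHP Version" in content:
--             return "Medium", "PHP info page exposed — server configuration leaked"
--     if "wp-config.php" in path:
--         if "DB_PASSWORD" in content or "DB_NAME" in content:
--             return "Critical", "WordPress config exposed — DB credentials visible"
--     if path in ("/robots.txt",):
--         return "Info", "robots.txt found — may reveal hidden paths"
--     if path in ("/crossdomain.xml", "/clientaccesspolicy.xml"):
--         if "<allow-access-from" in content:
--             return "Medium", "Permissive crossdomain policy"
--     if "swagger" in path.lower() or "api-docs" in path.lower():
--         return "Medium", "API documentation publicly exposed"
--     if "/graphql" in path:
--         return "Medium", "GraphQL endpoint exposed"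
--     if path in ("/server-status", "/server-info"):
--         return "Medium", "Apache server status exposed"
--     if path in ("/elmah.axd", "/trace.axd"):
--         return "High", "ASP.NET error log exposed"
--     if path == "/docker-compose.yml" or path == "/Dockerfile":
--         return "High", "Docker configuration file exposed"
--     if path in ("/composer.json", "/composer.lock", "/package.json"):
--         return "Low", "Dependency file exposed — reveals technology stack"
--     if any(path.endswith(ext) for ext in [".bak", ".old", ".backup"]):
--         return "High", "Backup file exposed — may contain sensitive data"
--     if content and len(content) > 50:
--         return "Low", f"File accessible: {path}"
--     return None, None
-- ===== SOURCE B (Python) =====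
-- # Different algorithm: instead of an ordered fall-through cascade, evaluate every
-- # rule independently, collect the priorities of ALL matching rules, and return the
-- # finding with the minimum priority; exact-path rules go through one dict lookup.
--
-- _SEVMSG = {
--     0: ("Critical", ".git directory exposed — full source code dump possible via git-dumper"),
--     1: ("Critical", ".env file exposed — credentials and secrets visible"),
--     2: ("High", ".env file accessible"),
--     3: ("Medium", "PHP info page exposed — server configuration leaked"),
--     4: ("Critical", "WordPress config exposed — DB credentials visible"),
--     5: ("Info", "robots.txt found — may reveal hidden paths"),
--     6: ("Medium", "Permissive crossdomain policy"),
--     7: ("Medium", "API documentation publicly exposed"),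
--     8: ("Medium", "GraphQL endpoint exposed"),
--     9: ("Medium", "Apache server status exposed"),
--     10: ("High", "ASP.NET error log exposed"),
--     11: ("High", "Docker configuration file exposed"),
--     12: ("Low", "Dependency file exposed — reveals technology stack"),
--     13: ("High", "Backup file exposed — may contain sensitive data"),
-- }
--
-- # exact path -> (priority, required content substring or None)
-- _EXACT = {
--     "/phpinfo.php": (3, "PHP Version"),
--     "/info.php": (3, "PHP Version"),
--     "/robots.txt": (5, None),
--     "/crossdomain.xml": (6, "<allow-access-from"),
--     "/clientaccesspolicy.xml": (6, "<allow-access-from"),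
--     "/server-status": (9, None),
--     "/server-info": (9, None),
--     "/elmah.axd": (10, None),
--     "/trace.axd": (10, None),
--     "/docker-compose.yml": (11, None),
--     "/Dockerfile": (11, None),
--     "/composer.json": (12, None),
--     "/composer.lock": (12, None),
--     "/package.json": (12, None),
-- }
--
--
-- def _classify_sensitive_file(path: str, content: str):
--     cands = []
--     if ".git" in path and ("ref:" in content or "[core]" in content or "repositoryformatversion" in content):
--         cands.append(0)
--     if ".env" in path and any(k in content for k in ("DB_", "APP_KEY", "SECRET", "PASSWORD", "TOKEN", "AWS_")):
--         cands.append(1)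
--     if ".env" in path:
--         cands.append(2)
--     hit = _EXACT.get(path)
--     if hit is not None and (hit[1] is None or hit[1] in content):
--         cands.append(hit[0])
--     if "wp-config.php" in path and ("DB_PASSWORD" in content or "DB_NAME" in content):
--         cands.append(4)
--     low = path.lower()
--     if "swagger" in low or "api-docs" in low:
--         cands.append(7)
--     if "/graphql" in path:
--         cands.append(8)
--     if path.endswith((".bak", ".old", ".backup")):
--         cands.append(13)
--     if content and len(content) > 50:
--         cands.append(14)
--     if not cands:
--         return None, None
--     k = min(cands)
--     if k == 14:
--         return "Low", f"File accessible: {path}"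
--     return _SEVMSG[k]
-- ===== Notes on version B (the rewrite author's own statement) =====
-- stated objective: alternative
-- what changed: Instead of A's ordered fall-through if/return cascade, B evaluates every rule independently, collects the priorities of all matching rules into a list, routes all exact-path rules through a single dict lookup, and returns the finding of minimum priority (severity/message read from a priority-keyed table).
import Mathlib
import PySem

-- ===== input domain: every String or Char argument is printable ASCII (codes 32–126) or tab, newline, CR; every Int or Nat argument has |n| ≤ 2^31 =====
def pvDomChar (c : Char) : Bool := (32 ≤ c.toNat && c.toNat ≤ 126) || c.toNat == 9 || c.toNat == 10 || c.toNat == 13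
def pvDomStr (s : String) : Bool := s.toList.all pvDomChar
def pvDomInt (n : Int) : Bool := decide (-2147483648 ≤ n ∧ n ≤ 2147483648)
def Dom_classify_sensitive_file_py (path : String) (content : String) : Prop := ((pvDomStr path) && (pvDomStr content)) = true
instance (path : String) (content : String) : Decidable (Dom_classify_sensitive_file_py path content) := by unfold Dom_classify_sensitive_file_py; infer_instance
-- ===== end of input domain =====

-- B replaces A's ordered fall-through cascade by a different algorithm: every rule is
-- evaluated independently, the priorities of ALL matching rules are collected, and the
-- minimum priority decides the finding; exact-path rules become one dict lookup.

-- ===== PORT A =====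
-- Literal transliteration: each sequential `if ... return` of A is one helper step;
-- falling through to the next check is a call to the next step.
def pvA_step16 (path : String) (content : String) : Option String × Option String :=
  ((none, none) : Option String × Option String)

def pvA_step15 (path : String) (content : String) : Option String × Option String :=
  if (!(content == "") && decide (PySem.Str.len content > 50)) then ((some "Low", some ("File accessible: " ++ path)) : Option String × Option String) else pvA_step16 path content

def pvA_step14 (path : String) (content : String) : Option String × Option String :=
  if [".bak", ".old", ".backup"].any (fun ext => PySem.Str.endswith path ext) then ((some "High", some "Backup file exposed — may contain sensitive data") : Option String × Option String) else pvA_step15 path content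

def pvA_step13 (path : String) (content : String) : Option String × Option String :=
  if (path == "/composer.json" || path == "/composer.lock" || path == "/package.json") then ((some "Low", some "Dependency file exposed — reveals technology stack") : Option String × Option String) else pvA_step14 path content

def pvA_step12 (path : String) (content : String) : Option String × Option String :=
  if (path == "/docker-compose.yml" || path == "/Dockerfile") then ((some "High", some "Docker configuration file exposed") : Option String × Option String) else pvA_step13 path content

def pvA_step11 (path : String) (content : String) : Option String × Option String :=
  if (path == "/elmah.axd" || path == "/trace.axd") then ((some "High", some "ASP.NET error log exposed") : Option String × Option String) else pvA_step12 path content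

def pvA_step10 (path : String) (content : String) : Option String × Option String :=
  if (path == "/server-status" || path == "/server-info") then ((some "Medium", some "Apache server status exposed") : Option String × Option String) else pvA_step11 path content

def pvA_step9 (path : String) (content : String) : Option String × Option String :=
  if PySem.Str.isIn "/graphql" path then ((some "Medium", some "GraphQL endpoint exposed") : Option String × Option String) else pvA_step10 path content

def pvA_step8 (path : String) (content : String) : Option String × Option String :=
  if (PySem.Str.isIn "swagger" (PySem.Str.lower path) || PySem.Str.isIn "api-docs" (PySem.Str.lower path)) then ((some "Medium", some "API documentation publicly exposed") : Option String × Option String) else pvA_step9 path content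

def pvA_step7 (path : String) (content : String) : Option String × Option String :=
  if (path == "/crossdomain.xml" || path == "/clientaccesspolicy.xml") then
    (if PySem.Str.isIn "<allow-access-from" content then ((some "Medium", some "Permissive crossdomain policy") : Option String × Option String) else pvA_step8 path content)
  else pvA_step8 path content

def pvA_step6 (path : String) (content : String) : Option String × Option String :=
  if (path == "/robots.txt") then ((some "Info", some "robots.txt found — may reveal hidden paths") : Option String × Option String) else pvA_step7 path content

def pvA_step5 (path : String) (content : String) : Option String × Option String :=
  if PySem.Str.isIn "wp-config.php" path then
    (if (PySem.Str.isIn "DB_PASSWORD" content || PySem.Str.isIn "DB_NAME" content) then ((some "Critical", some "WordPress config exposed — DB credentials visible") : Option String × Option String) else pvA_step6 path content)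
  else pvA_step6 path content

def pvA_step4 (path : String) (content : String) : Option String × Option String :=
  if (path == "/phpinfo.php" || path == "/info.php") then
    (if PySem.Str.isIn "PHP Version" content then ((some "Medium", some "PHP info page exposed — server configuration leaked") : Option String × Option String) else pvA_step5 path content)
  else pvA_step5 path content

def pvA_step3 (path : String) (content : String) : Option String × Option String :=
  if PySem.Str.isIn ".env" path then
    (if ["DB_", "APP_KEY", "SECRET", "PASSWORD", "TOKEN", "AWS_"].any (fun k => PySem.Str.isIn k content) then ((some "Critical", some ".env file exposed — credentials and secrets visible") : Option String × Option String) else ((some "High", some ".env file accessible") : Option String × Option String))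
  else pvA_step4 path content

def pvA_step1 (path : String) (content : String) : Option String × Option String :=
  if PySem.Str.isIn ".git" path then
    (if (PySem.Str.isIn "ref:" content || PySem.Str.isIn "[core]" content || PySem.Str.isIn "repositoryformatversion" content) then ((some "Critical", some ".git directory exposed — full source code dump possible via git-dumper") : Option String × Option String) else pvA_step3 path content)
  else pvA_step3 path content

def classify_sensitive_file_py (path : String) (content : String) : Option String × Option String :=
  pvA_step1 path content

-- ===== PORT B =====
-- priority -> (severity, message), as in Source B's _SEVMSG
def pvSevMsg : PySem.Dict Nat (String × String) := PySem.Dict.ofList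
  [ (0, ("Critical", ".git directory exposed — full source code dump possible via git-dumper")),
    (1, ("Critical", ".env file exposed — credentials and secrets visible")),
    (2, ("High", ".env file accessible")),
    (3, ("Medium", "PHP info page exposed — server configuration leaked")),
    (4, ("Critical", "WordPress config exposed — DB credentials visible")),
    (5, ("Info", "robots.txt found — may reveal hidden paths")),
    (6, ("Medium", "Permissive crossdomain policy")),
    (7, ("Medium", "API documentation publicly exposed")),
    (8, ("Medium", "GraphQL endpoint exposed")),
    (9, ("Medium", "Apache server status exposed")),
    (10, ("High", "ASP.NET error log exposed")),
    (11, ("High", "Docker configuration file exposed")),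
    (12, ("Low", "Dependency file exposed — reveals technology stack")),
    (13, ("High", "Backup file exposed — may contain sensitive data")) ]

-- exact path -> (priority, required content substring or none), as in Source B's _EXACT
def pvExact : PySem.Dict String (Nat × Option String) := PySem.Dict.ofList
  [ ("/phpinfo.php", (3, some "PHP Version")),
    ("/info.php", (3, some "PHP Version")),
    ("/robots.txt", (5, none)),
    ("/crossdomain.xml", (6, some "<allow-access-from")),
    ("/clientaccesspolicy.xml", (6, some "<allow-access-from")),
    ("/server-status", (9, none)),
    ("/server-info", (9, none)),
    ("/elmah.axd", (10, none)),
    ("/trace.axd", (10, none)),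
    ("/docker-compose.yml", (11, none)),
    ("/Dockerfile", (11, none)),
    ("/composer.json", (12, none)),
    ("/composer.lock", (12, none)),
    ("/package.json", (12, none)) ]

-- the `cands` list built by Source B's sequence of appends
def pvCands (path : String) (content : String) : List Nat :=
  (if PySem.Str.isIn ".git" path && (PySem.Str.isIn "ref:" content || PySem.Str.isIn "[core]" content || PySem.Str.isIn "repositoryformatversion" content) then [0] else []) ++
  (if PySem.Str.isIn ".env" path && ["DB_", "APP_KEY", "SECRET", "PASSWORD", "TOKEN", "AWS_"].any (fun k => PySem.Str.isIn k content) then [1] else []) ++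
  (if PySem.Str.isIn ".env" path then [2] else []) ++
  (match pvExact.get? path with
   | some (k, req) => if (match req with | none => true | some r => PySem.Str.isIn r content) then [k] else []
   | none => []) ++
  (if PySem.Str.isIn "wp-config.php" path && (PySem.Str.isIn "DB_PASSWORD" content || PySem.Str.isIn "DB_NAME" content) then [4] else []) ++
  (if PySem.Str.isIn "swagger" (PySem.Str.lower path) || PySem.Str.isIn "api-docs" (PySem.Str.lower path) then [7] else []) ++
  (if PySem.Str.isIn "/graphql" path then [8] else []) ++
  (if [".bak", ".old", ".backup"].any (fun ext => PySem.Str.endswith path ext) then [13] else []) ++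
  (if !(content == "") && decide (PySem.Str.len content > 50) then [14] else [])

def classify_sensitive_file_py_alt (path : String) (content : String) : Option String × Option String :=
  match PySem.List.min? (pvCands path content) (fun x => x) with
  | none => (none, none)
  | some k =>
    if k == 14 then (some "Low", some ("File accessible: " ++ path))
    else
      match pvSevMsg.get? k with
      | some sm => (some sm.1, some sm.2)
      | none => (none, none)  -- unreachable: every candidate < 14 is a key of _SEVMSG (Python would raise KeyError)

-- ===== PRECONDITION & SPEC =====
def Spec_classify_sensitive_file_py (path : String) (content : String) (out : Option String × Option String) : Prop := out = classify_sensitive_file_py_alt path content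
instance (path : String) (content : String) (out : Option String × Option String) : Decidable (Spec_classify_sensitive_file_py path content out) := by unfold Spec_classify_sensitive_file_py; infer_instance

-- ===== CLAIM (what is proved, stated in full; the proofs are below) =====
def Claim_equal_classify_sensitive_file_py : Prop := ∀ (path : String) (content : String), Dom_classify_sensitive_file_py path content → Spec_classify_sensitive_file_py path content (classify_sensitive_file_py path content)

-- ===== LEMMAS AND PROOFS =====

-- the fifteen rule predicates, in priority order (proof-only abbreviations)
def pvP0 (p c : String) : Bool := PySem.Str.isIn ".git" p && (PySem.Str.isIn "ref:" c || PySem.Str.isIn "[core]" c || PySem.Str.isIn "repositoryformatversion" c)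
def pvP1 (p c : String) : Bool := PySem.Str.isIn ".env" p && ["DB_", "APP_KEY", "SECRET", "PASSWORD", "TOKEN", "AWS_"].any (fun k => PySem.Str.isIn k c)
def pvP2 (p : String) : Bool := PySem.Str.isIn ".env" p
def pvP3 (p c : String) : Bool := (p == "/phpinfo.php" || p == "/info.php") && PySem.Str.isIn "PHP Version" c
def pvP4 (p c : String) : Bool := PySem.Str.isIn "wp-config.php" p && (PySem.Str.isIn "DB_PASSWORD" c || PySem.Str.isIn "DB_NAME" c)
def pvP5 (p : String) : Bool := p == "/robots.txt"
def pvP6 (p c : String) : Bool := (p == "/crossdomain.xml" || p == "/clientaccesspolicy.xml") && PySem.Str.isIn "<allow-access-from" c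
def pvP7 (p : String) : Bool := PySem.Str.isIn "swagger" (PySem.Str.lower p) || PySem.Str.isIn "api-docs" (PySem.Str.lower p)
def pvP8 (p : String) : Bool := PySem.Str.isIn "/graphql" p
def pvP9 (p : String) : Bool := p == "/server-status" || p == "/server-info"
def pvP10 (p : String) : Bool := p == "/elmah.axd" || p == "/trace.axd"
def pvP11 (p : String) : Bool := p == "/docker-compose.yml" || p == "/Dockerfile"
def pvP12 (p : String) : Bool := p == "/composer.json" || p == "/composer.lock" || p == "/package.json"
def pvP13 (p : String) : Bool := [".bak", ".old", ".backup"].any (fun ext => PySem.Str.endswith p ext)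
def pvP14 (c : String) : Bool := !(c == "") && decide (PySem.Str.len c > 50)

set_option maxHeartbeats 2000000 in
theorem pv_exact_get (p : String) : pvExact.get? p =
    (if p = "/package.json" then some (12, none)
     else if p = "/composer.lock" then some (12, none)
     else if p = "/composer.json" then some (12, none)
     else if p = "/Dockerfile" then some (11, none)
     else if p = "/docker-compose.yml" then some (11, none)
     else if p = "/trace.axd" then some (10, none)
     else if p = "/elmah.axd" then some (10, none)
     else if p = "/server-info" then some (9, none)
     else if p = "/server-status" then some (9, none)
     else if p = "/clientaccesspolicy.xml" then some (6, some "<allow-access-from")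
     else if p = "/crossdomain.xml" then some (6, some "<allow-access-from")
     else if p = "/robots.txt" then some (5, none)
     else if p = "/info.php" then some (3, some "PHP Version")
     else if p = "/phpinfo.php" then some (3, some "PHP Version")
     else none) := by
  simp only [pvExact, PySem.Dict.ofList, PySem.Dict.update, List.foldl]
  simp only [PySem.Dict.get?_insert, PySem.Dict.get?_empty]

-- the dict segment of pvCands as an explicit case split on the path
set_option maxHeartbeats 1000000 in
theorem pv_dictseg_eq (p c : String) :
    (match pvExact.get? p with
     | some (k, req) => if (match req with | none => true | some r => PySem.Str.isIn r c) then [k] else []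
     | none => ([] : List Nat)) =
    (if pvP3 p c then [3] else if pvP5 p then [5] else if pvP6 p c then [6]
     else if pvP9 p then [9] else if pvP10 p then [10] else if pvP11 p then [11]
     else if pvP12 p then [12] else []) := by
  rw [pv_exact_get]
  by_cases h1 : p = "/package.json"
  · subst h1
    simp [pvP3, pvP5, pvP6, pvP9, pvP10, pvP11, pvP12]
  rw [if_neg h1]
  by_cases h2 : p = "/composer.lock"
  · subst h2
    simp [pvP3, pvP5, pvP6, pvP9, pvP10, pvP11, pvP12]
  rw [if_neg h2]
  by_cases h3 : p = "/composer.json"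
  · subst h3
    simp [pvP3, pvP5, pvP6, pvP9, pvP10, pvP11, pvP12]
  rw [if_neg h3]
  by_cases h4 : p = "/Dockerfile"
  · subst h4
    simp [pvP3, pvP5, pvP6, pvP9, pvP10, pvP11, pvP12]
  rw [if_neg h4]
  by_cases h5 : p = "/docker-compose.yml"
  · subst h5
    simp [pvP3, pvP5, pvP6, pvP9, pvP10, pvP11, pvP12]
  rw [if_neg h5]
  by_cases h6 : p = "/trace.axd"
  · subst h6
    simp [pvP3, pvP5, pvP6, pvP9, pvP10, pvP11, pvP12]
  rw [if_neg h6]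
  by_cases h7 : p = "/elmah.axd"
  · subst h7
    simp [pvP3, pvP5, pvP6, pvP9, pvP10, pvP11, pvP12]
  rw [if_neg h7]
  by_cases h8 : p = "/server-info"
  · subst h8
    simp [pvP3, pvP5, pvP6, pvP9, pvP10, pvP11, pvP12]
  rw [if_neg h8]
  by_cases h9 : p = "/server-status"
  · subst h9
    simp [pvP3, pvP5, pvP6, pvP9, pvP10, pvP11, pvP12]
  rw [if_neg h9]
  by_cases h10 : p = "/clientaccesspolicy.xml"
  · subst h10
    simp [pvP3, pvP5, pvP6, pvP9, pvP10, pvP11, pvP12]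
  rw [if_neg h10]
  by_cases h11 : p = "/crossdomain.xml"
  · subst h11
    simp [pvP3, pvP5, pvP6, pvP9, pvP10, pvP11, pvP12]
  rw [if_neg h11]
  by_cases h12 : p = "/robots.txt"
  · subst h12
    simp [pvP3, pvP5, pvP6, pvP9, pvP10, pvP11, pvP12]
  rw [if_neg h12]
  by_cases h13 : p = "/info.php"
  · subst h13
    simp [pvP3, pvP5, pvP6, pvP9, pvP10, pvP11, pvP12]
  rw [if_neg h13]
  by_cases h14 : p = "/phpinfo.php"
  · subst h14
    simp [pvP3, pvP5, pvP6, pvP9, pvP10, pvP11, pvP12]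
  rw [if_neg h14]
  simp [pvP3, pvP5, pvP6, pvP9, pvP10, pvP11, pvP12, beq_iff_eq, h1, h2, h3, h4, h5, h6, h7, h8, h9, h10, h11, h12, h13, h14]

-- the candidate list written with the rule predicates
theorem pv_cands_eq (p c : String) : pvCands p c =
    (if pvP0 p c then [0] else []) ++ (if pvP1 p c then [1] else []) ++ (if pvP2 p then [2] else []) ++
    (if pvP3 p c then [3] else if pvP5 p then [5] else if pvP6 p c then [6]
     else if pvP9 p then [9] else if pvP10 p then [10] else if pvP11 p then [11]
     else if pvP12 p then [12] else []) ++
    (if pvP4 p c then [4] else []) ++ (if pvP7 p then [7] else []) ++ (if pvP8 p then [8] else []) ++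
    (if pvP13 p then [13] else []) ++ (if pvP14 c then [14] else []) := by
  unfold pvCands
  rw [pv_dictseg_eq]
  rfl

-- membership characterization of the candidate list
theorem pv_cands_mem (p c : String) (x : Nat) (hx : x ∈ pvCands p c) :
    (x = 0 ∧ pvP0 p c = true) ∨ (x = 1 ∧ pvP1 p c = true) ∨ (x = 2 ∧ pvP2 p = true) ∨
    (x = 3 ∧ pvP3 p c = true) ∨ (x = 5 ∧ pvP5 p = true) ∨ (x = 6 ∧ pvP6 p c = true) ∨
    (x = 9 ∧ pvP9 p = true) ∨ (x = 10 ∧ pvP10 p = true) ∨ (x = 11 ∧ pvP11 p = true) ∨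
    (x = 12 ∧ pvP12 p = true) ∨ (x = 4 ∧ pvP4 p c = true) ∨ (x = 7 ∧ pvP7 p = true) ∨
    (x = 8 ∧ pvP8 p = true) ∨ (x = 13 ∧ pvP13 p = true) ∨ (x = 14 ∧ pvP14 c = true) := by
  rw [pv_cands_eq] at hx
  simp only [List.mem_append] at hx
  rcases hx with ((((((((h | h) | h) | h) | h) | h) | h) | h) | h) <;>
    (split_ifs at h <;> simp_all)

-- if k is a candidate and a lower bound of all candidates, the min is k
theorem pv_min_eq (p c : String) (k : Nat) (hmem : k ∈ pvCands p c)
    (hlb : ∀ x ∈ pvCands p c, k ≤ x) :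
    PySem.List.min? (pvCands p c) (fun x => x) = some k := by
  cases h : PySem.List.min? (pvCands p c) (fun x => x) with
  | none =>
      rw [PySem.List.min?_eq_none_iff] at h
      rw [h] at hmem
      simp at hmem
  | some m =>
      have hmemm := PySem.List.min?_mem h
      have h1 : m ≤ k := PySem.List.min?_isMin h k hmem
      have h2 : k ≤ m := hlb m hmemm
      have : m = k := le_antisymm h1 h2
      rw [this]

-- A's steps rewritten through the rule predicates
theorem pvA_step1_eq (p c : String) : pvA_step1 p c =
    (if pvP0 p c then ((some "Critical", some ".git directory exposed — full source code dump possible via git-dumper") : Option String × Option String) else pvA_step3 p c) := by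
  unfold pvA_step1 pvP0
  cases hg : PySem.Str.isIn ".git" p <;>
    cases hr : (PySem.Str.isIn "ref:" c || PySem.Str.isIn "[core]" c || PySem.Str.isIn "repositoryformatversion" c) <;>
    simp [hg, hr]

theorem pvA_step3_eq (p c : String) : pvA_step3 p c =
    (if pvP1 p c then ((some "Critical", some ".env file exposed — credentials and secrets visible") : Option String × Option String)
     else if pvP2 p then ((some "High", some ".env file accessible") : Option String × Option String)
     else pvA_step4 p c) := by
  unfold pvA_step3 pvP1 pvP2
  cases he : PySem.Str.isIn ".env" p <;>
    cases ha : (["DB_", "APP_KEY", "SECRET", "PASSWORD", "TOKEN", "AWS_"].any (fun k => PySem.Str.isIn k c)) <;>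
    simp [he, ha]

theorem pvA_step4_eq (p c : String) : pvA_step4 p c =
    (if pvP3 p c then ((some "Medium", some "PHP info page exposed — server configuration leaked") : Option String × Option String) else pvA_step5 p c) := by
  unfold pvA_step4 pvP3
  cases hp : (p == "/phpinfo.php" || p == "/info.php") <;>
    cases hc : PySem.Str.isIn "PHP Version" c <;>
    simp [hp, hc]

theorem pvA_step5_eq (p c : String) : pvA_step5 p c =
    (if pvP4 p c then ((some "Critical", some "WordPress config exposed — DB credentials visible") : Option String × Option String) else pvA_step6 p c) := by
  unfold pvA_step5 pvP4
  cases hp : PySem.Str.isIn "wp-config.php" p <;>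
    cases hc : (PySem.Str.isIn "DB_PASSWORD" c || PySem.Str.isIn "DB_NAME" c) <;>
    simp [hp, hc]

theorem pvA_step6_eq (p c : String) : pvA_step6 p c =
    (if pvP5 p then ((some "Info", some "robots.txt found — may reveal hidden paths") : Option String × Option String) else pvA_step7 p c) := rfl

theorem pvA_step7_eq (p c : String) : pvA_step7 p c =
    (if pvP6 p c then ((some "Medium", some "Permissive crossdomain policy") : Option String × Option String) else pvA_step8 p c) := by
  unfold pvA_step7 pvP6
  cases hp : (p == "/crossdomain.xml" || p == "/clientaccesspolicy.xml") <;>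
    cases hc : PySem.Str.isIn "<allow-access-from" c <;>
    simp [hp, hc]

theorem pvA_step8_eq (p c : String) : pvA_step8 p c =
    (if pvP7 p then ((some "Medium", some "API documentation publicly exposed") : Option String × Option String) else pvA_step9 p c) := rfl

theorem pvA_step9_eq (p c : String) : pvA_step9 p c =
    (if pvP8 p then ((some "Medium", some "GraphQL endpoint exposed") : Option String × Option String) else pvA_step10 p c) := rfl

theorem pvA_step10_eq (p c : String) : pvA_step10 p c =
    (if pvP9 p then ((some "Medium", some "Apache server status exposed") : Option String × Option String) else pvA_step11 p c) := rfl

theorem pvA_step11_eq (p c : String) : pvA_step11 p c =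
    (if pvP10 p then ((some "High", some "ASP.NET error log exposed") : Option String × Option String) else pvA_step12 p c) := rfl

theorem pvA_step12_eq (p c : String) : pvA_step12 p c =
    (if pvP11 p then ((some "High", some "Docker configuration file exposed") : Option String × Option String) else pvA_step13 p c) := rfl

theorem pvA_step13_eq (p c : String) : pvA_step13 p c =
    (if pvP12 p then ((some "Low", some "Dependency file exposed — reveals technology stack") : Option String × Option String) else pvA_step14 p c) := rfl

theorem pvA_step14_eq (p c : String) : pvA_step14 p c =
    (if pvP13 p then ((some "High", some "Backup file exposed — may contain sensitive data") : Option String × Option String) else pvA_step15 p c) := rfl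

theorem pvA_step15_eq (p c : String) : pvA_step15 p c =
    (if pvP14 c then ((some "Low", some ("File accessible: " ++ p)) : Option String × Option String) else pvA_step16 p c) := rfl

theorem pv_eqEnd (p c : String) (h0 : pvP0 p c = false) (h1 : pvP1 p c = false) (h2 : pvP2 p = false) (h3 : pvP3 p c = false) (h4 : pvP4 p c = false) (h5 : pvP5 p = false) (h6 : pvP6 p c = false) (h7 : pvP7 p = false) (h8 : pvP8 p = false) (h9 : pvP9 p = false) (h10 : pvP10 p = false) (h11 : pvP11 p = false) (h12 : pvP12 p = false) (h13 : pvP13 p = false) (h14 : pvP14 c = false) :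
    pvA_step16 p c = classify_sensitive_file_py_alt p c := by
  have hnil : pvCands p c = [] := by
    rw [List.eq_nil_iff_forall_not_mem]
    intro x hx
    rcases pv_cands_mem p c x hx with (⟨rfl, hh⟩ | ⟨rfl, hh⟩ | ⟨rfl, hh⟩ | ⟨rfl, hh⟩ | ⟨rfl, hh⟩ | ⟨rfl, hh⟩ | ⟨rfl, hh⟩ | ⟨rfl, hh⟩ | ⟨rfl, hh⟩ | ⟨rfl, hh⟩ | ⟨rfl, hh⟩ | ⟨rfl, hh⟩ | ⟨rfl, hh⟩ | ⟨rfl, hh⟩ | ⟨rfl, hh⟩) <;> simp_all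
  unfold classify_sensitive_file_py_alt
  rw [hnil]
  rfl

theorem pv_eqR14 (p c : String) (h0 : pvP0 p c = false) (h1 : pvP1 p c = false) (h2 : pvP2 p = false) (h3 : pvP3 p c = false) (h4 : pvP4 p c = false) (h5 : pvP5 p = false) (h6 : pvP6 p c = false) (h7 : pvP7 p = false) (h8 : pvP8 p = false) (h9 : pvP9 p = false) (h10 : pvP10 p = false) (h11 : pvP11 p = false) (h12 : pvP12 p = false) (h13 : pvP13 p = false) :
    pvA_step15 p c = classify_sensitive_file_py_alt p c := by
  rw [pvA_step15_eq]
  cases h14 : pvP14 c with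
  | true =>
      rw [if_pos rfl]
      have hmem : (14 : Nat) ∈ pvCands p c := by
        rw [pv_cands_eq]
        simp [List.mem_append, h14, h0, h1, h2, h3, h4, h5, h6, h7, h8, h9, h10, h11, h12, h13]
      have hlb : ∀ x ∈ pvCands p c, (14 : Nat) ≤ x := by
        intro x hx
        rcases pv_cands_mem p c x hx with (⟨rfl, hh⟩ | ⟨rfl, hh⟩ | ⟨rfl, hh⟩ | ⟨rfl, hh⟩ | ⟨rfl, hh⟩ | ⟨rfl, hh⟩ | ⟨rfl, hh⟩ | ⟨rfl, hh⟩ | ⟨rfl, hh⟩ | ⟨rfl, hh⟩ | ⟨rfl, hh⟩ | ⟨rfl, hh⟩ | ⟨rfl, hh⟩ | ⟨rfl, hh⟩ | ⟨rfl, hh⟩) <;> simp_all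
      unfold classify_sensitive_file_py_alt
      rw [pv_min_eq p c 14 hmem hlb]
      rfl
  | false =>
      rw [if_neg (by decide)]
      exact pv_eqEnd p c h0 h1 h2 h3 h4 h5 h6 h7 h8 h9 h10 h11 h12 h13 h14

theorem pv_eqR13 (p c : String) (h0 : pvP0 p c = false) (h1 : pvP1 p c = false) (h2 : pvP2 p = false) (h3 : pvP3 p c = false) (h4 : pvP4 p c = false) (h5 : pvP5 p = false) (h6 : pvP6 p c = false) (h7 : pvP7 p = false) (h8 : pvP8 p = false) (h9 : pvP9 p = false) (h10 : pvP10 p = false) (h11 : pvP11 p = false) (h12 : pvP12 p = false) :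
    pvA_step14 p c = classify_sensitive_file_py_alt p c := by
  rw [pvA_step14_eq]
  cases h13 : pvP13 p with
  | true =>
      rw [if_pos rfl]
      have hmem : (13 : Nat) ∈ pvCands p c := by
        rw [pv_cands_eq]
        simp [List.mem_append, h13, h0, h1, h2, h3, h4, h5, h6, h7, h8, h9, h10, h11, h12]
      have hlb : ∀ x ∈ pvCands p c, (13 : Nat) ≤ x := by
        intro x hx
        rcases pv_cands_mem p c x hx with (⟨rfl, hh⟩ | ⟨rfl, hh⟩ | ⟨rfl, hh⟩ | ⟨rfl, hh⟩ | ⟨rfl, hh⟩ | ⟨rfl, hh⟩ | ⟨rfl, hh⟩ | ⟨rfl, hh⟩ | ⟨rfl, hh⟩ | ⟨rfl, hh⟩ | ⟨rfl, hh⟩ | ⟨rfl, hh⟩ | ⟨rfl, hh⟩ | ⟨rfl, hh⟩ | ⟨rfl, hh⟩) <;> simp_all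
      unfold classify_sensitive_file_py_alt
      rw [pv_min_eq p c 13 hmem hlb]
      rfl
  | false =>
      rw [if_neg (by decide)]
      exact pv_eqR14 p c h0 h1 h2 h3 h4 h5 h6 h7 h8 h9 h10 h11 h12 h13

theorem pv_eqR12 (p c : String) (h0 : pvP0 p c = false) (h1 : pvP1 p c = false) (h2 : pvP2 p = false) (h3 : pvP3 p c = false) (h4 : pvP4 p c = false) (h5 : pvP5 p = false) (h6 : pvP6 p c = false) (h7 : pvP7 p = false) (h8 : pvP8 p = false) (h9 : pvP9 p = false) (h10 : pvP10 p = false) (h11 : pvP11 p = false) :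
    pvA_step13 p c = classify_sensitive_file_py_alt p c := by
  rw [pvA_step13_eq]
  cases h12 : pvP12 p with
  | true =>
      rw [if_pos rfl]
      have hmem : (12 : Nat) ∈ pvCands p c := by
        rw [pv_cands_eq]
        simp [List.mem_append, h12, h0, h1, h2, h3, h4, h5, h6, h7, h8, h9, h10, h11]
      have hlb : ∀ x ∈ pvCands p c, (12 : Nat) ≤ x := by
        intro x hx
        rcases pv_cands_mem p c x hx with (⟨rfl, hh⟩ | ⟨rfl, hh⟩ | ⟨rfl, hh⟩ | ⟨rfl, hh⟩ | ⟨rfl, hh⟩ | ⟨rfl, hh⟩ | ⟨rfl, hh⟩ | ⟨rfl, hh⟩ | ⟨rfl, hh⟩ | ⟨rfl, hh⟩ | ⟨rfl, hh⟩ | ⟨rfl, hh⟩ | ⟨rfl, hh⟩ | ⟨rfl, hh⟩ | ⟨rfl, hh⟩) <;> simp_all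
      unfold classify_sensitive_file_py_alt
      rw [pv_min_eq p c 12 hmem hlb]
      rfl
  | false =>
      rw [if_neg (by decide)]
      exact pv_eqR13 p c h0 h1 h2 h3 h4 h5 h6 h7 h8 h9 h10 h11 h12

theorem pv_eqR11 (p c : String) (h0 : pvP0 p c = false) (h1 : pvP1 p c = false) (h2 : pvP2 p = false) (h3 : pvP3 p c = false) (h4 : pvP4 p c = false) (h5 : pvP5 p = false) (h6 : pvP6 p c = false) (h7 : pvP7 p = false) (h8 : pvP8 p = false) (h9 : pvP9 p = false) (h10 : pvP10 p = false) :
    pvA_step12 p c = classify_sensitive_file_py_alt p c := by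
  rw [pvA_step12_eq]
  cases h11 : pvP11 p with
  | true =>
      rw [if_pos rfl]
      have hmem : (11 : Nat) ∈ pvCands p c := by
        rw [pv_cands_eq]
        simp [List.mem_append, h11, h0, h1, h2, h3, h4, h5, h6, h7, h8, h9, h10]
      have hlb : ∀ x ∈ pvCands p c, (11 : Nat) ≤ x := by
        intro x hx
        rcases pv_cands_mem p c x hx with (⟨rfl, hh⟩ | ⟨rfl, hh⟩ | ⟨rfl, hh⟩ | ⟨rfl, hh⟩ | ⟨rfl, hh⟩ | ⟨rfl, hh⟩ | ⟨rfl, hh⟩ | ⟨rfl, hh⟩ | ⟨rfl, hh⟩ | ⟨rfl, hh⟩ | ⟨rfl, hh⟩ | ⟨rfl, hh⟩ | ⟨rfl, hh⟩ | ⟨rfl, hh⟩ | ⟨rfl, hh⟩) <;> simp_all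
      unfold classify_sensitive_file_py_alt
      rw [pv_min_eq p c 11 hmem hlb]
      rfl
  | false =>
      rw [if_neg (by decide)]
      exact pv_eqR12 p c h0 h1 h2 h3 h4 h5 h6 h7 h8 h9 h10 h11

theorem pv_eqR10 (p c : String) (h0 : pvP0 p c = false) (h1 : pvP1 p c = false) (h2 : pvP2 p = false) (h3 : pvP3 p c = false) (h4 : pvP4 p c = false) (h5 : pvP5 p = false) (h6 : pvP6 p c = false) (h7 : pvP7 p = false) (h8 : pvP8 p = false) (h9 : pvP9 p = false) :
    pvA_step11 p c = classify_sensitive_file_py_alt p c := by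
  rw [pvA_step11_eq]
  cases h10 : pvP10 p with
  | true =>
      rw [if_pos rfl]
      have hmem : (10 : Nat) ∈ pvCands p c := by
        rw [pv_cands_eq]
        simp [List.mem_append, h10, h0, h1, h2, h3, h4, h5, h6, h7, h8, h9]
      have hlb : ∀ x ∈ pvCands p c, (10 : Nat) ≤ x := by
        intro x hx
        rcases pv_cands_mem p c x hx with (⟨rfl, hh⟩ | ⟨rfl, hh⟩ | ⟨rfl, hh⟩ | ⟨rfl, hh⟩ | ⟨rfl, hh⟩ | ⟨rfl, hh⟩ | ⟨rfl, hh⟩ | ⟨rfl, hh⟩ | ⟨rfl, hh⟩ | ⟨rfl, hh⟩ | ⟨rfl, hh⟩ | ⟨rfl, hh⟩ | ⟨rfl, hh⟩ | ⟨rfl, hh⟩ | ⟨rfl, hh⟩) <;> simp_all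
      unfold classify_sensitive_file_py_alt
      rw [pv_min_eq p c 10 hmem hlb]
      rfl
  | false =>
      rw [if_neg (by decide)]
      exact pv_eqR11 p c h0 h1 h2 h3 h4 h5 h6 h7 h8 h9 h10

theorem pv_eqR9 (p c : String) (h0 : pvP0 p c = false) (h1 : pvP1 p c = false) (h2 : pvP2 p = false) (h3 : pvP3 p c = false) (h4 : pvP4 p c = false) (h5 : pvP5 p = false) (h6 : pvP6 p c = false) (h7 : pvP7 p = false) (h8 : pvP8 p = false) :
    pvA_step10 p c = classify_sensitive_file_py_alt p c := by
  rw [pvA_step10_eq]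
  cases h9 : pvP9 p with
  | true =>
      rw [if_pos rfl]
      have hmem : (9 : Nat) ∈ pvCands p c := by
        rw [pv_cands_eq]
        simp [List.mem_append, h9, h0, h1, h2, h3, h4, h5, h6, h7, h8]
      have hlb : ∀ x ∈ pvCands p c, (9 : Nat) ≤ x := by
        intro x hx
        rcases pv_cands_mem p c x hx with (⟨rfl, hh⟩ | ⟨rfl, hh⟩ | ⟨rfl, hh⟩ | ⟨rfl, hh⟩ | ⟨rfl, hh⟩ | ⟨rfl, hh⟩ | ⟨rfl, hh⟩ | ⟨rfl, hh⟩ | ⟨rfl, hh⟩ | ⟨rfl, hh⟩ | ⟨rfl, hh⟩ | ⟨rfl, hh⟩ | ⟨rfl, hh⟩ | ⟨rfl, hh⟩ | ⟨rfl, hh⟩) <;> simp_all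
      unfold classify_sensitive_file_py_alt
      rw [pv_min_eq p c 9 hmem hlb]
      rfl
  | false =>
      rw [if_neg (by decide)]
      exact pv_eqR10 p c h0 h1 h2 h3 h4 h5 h6 h7 h8 h9

theorem pv_eqR8 (p c : String) (h0 : pvP0 p c = false) (h1 : pvP1 p c = false) (h2 : pvP2 p = false) (h3 : pvP3 p c = false) (h4 : pvP4 p c = false) (h5 : pvP5 p = false) (h6 : pvP6 p c = false) (h7 : pvP7 p = false) :
    pvA_step9 p c = classify_sensitive_file_py_alt p c := by
  rw [pvA_step9_eq]
  cases h8 : pvP8 p with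
  | true =>
      rw [if_pos rfl]
      have hmem : (8 : Nat) ∈ pvCands p c := by
        rw [pv_cands_eq]
        simp [List.mem_append, h8, h0, h1, h2, h3, h4, h5, h6, h7]
      have hlb : ∀ x ∈ pvCands p c, (8 : Nat) ≤ x := by
        intro x hx
        rcases pv_cands_mem p c x hx with (⟨rfl, hh⟩ | ⟨rfl, hh⟩ | ⟨rfl, hh⟩ | ⟨rfl, hh⟩ | ⟨rfl, hh⟩ | ⟨rfl, hh⟩ | ⟨rfl, hh⟩ | ⟨rfl, hh⟩ | ⟨rfl, hh⟩ | ⟨rfl, hh⟩ | ⟨rfl, hh⟩ | ⟨rfl, hh⟩ | ⟨rfl, hh⟩ | ⟨rfl, hh⟩ | ⟨rfl, hh⟩) <;> simp_all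
      unfold classify_sensitive_file_py_alt
      rw [pv_min_eq p c 8 hmem hlb]
      rfl
  | false =>
      rw [if_neg (by decide)]
      exact pv_eqR9 p c h0 h1 h2 h3 h4 h5 h6 h7 h8

theorem pv_eqR7 (p c : String) (h0 : pvP0 p c = false) (h1 : pvP1 p c = false) (h2 : pvP2 p = false) (h3 : pvP3 p c = false) (h4 : pvP4 p c = false) (h5 : pvP5 p = false) (h6 : pvP6 p c = false) :
    pvA_step8 p c = classify_sensitive_file_py_alt p c := by
  rw [pvA_step8_eq]
  cases h7 : pvP7 p with
  | true =>
      rw [if_pos rfl]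
      have hmem : (7 : Nat) ∈ pvCands p c := by
        rw [pv_cands_eq]
        simp [List.mem_append, h7, h0, h1, h2, h3, h4, h5, h6]
      have hlb : ∀ x ∈ pvCands p c, (7 : Nat) ≤ x := by
        intro x hx
        rcases pv_cands_mem p c x hx with (⟨rfl, hh⟩ | ⟨rfl, hh⟩ | ⟨rfl, hh⟩ | ⟨rfl, hh⟩ | ⟨rfl, hh⟩ | ⟨rfl, hh⟩ | ⟨rfl, hh⟩ | ⟨rfl, hh⟩ | ⟨rfl, hh⟩ | ⟨rfl, hh⟩ | ⟨rfl, hh⟩ | ⟨rfl, hh⟩ | ⟨rfl, hh⟩ | ⟨rfl, hh⟩ | ⟨rfl, hh⟩) <;> simp_all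
      unfold classify_sensitive_file_py_alt
      rw [pv_min_eq p c 7 hmem hlb]
      rfl
  | false =>
      rw [if_neg (by decide)]
      exact pv_eqR8 p c h0 h1 h2 h3 h4 h5 h6 h7

theorem pv_eqR6 (p c : String) (h0 : pvP0 p c = false) (h1 : pvP1 p c = false) (h2 : pvP2 p = false) (h3 : pvP3 p c = false) (h4 : pvP4 p c = false) (h5 : pvP5 p = false) :
    pvA_step7 p c = classify_sensitive_file_py_alt p c := by
  rw [pvA_step7_eq]
  cases h6 : pvP6 p c with
  | true =>
      rw [if_pos rfl]
      have hmem : (6 : Nat) ∈ pvCands p c := by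
        rw [pv_cands_eq]
        simp [List.mem_append, h6, h0, h1, h2, h3, h4, h5]
      have hlb : ∀ x ∈ pvCands p c, (6 : Nat) ≤ x := by
        intro x hx
        rcases pv_cands_mem p c x hx with (⟨rfl, hh⟩ | ⟨rfl, hh⟩ | ⟨rfl, hh⟩ | ⟨rfl, hh⟩ | ⟨rfl, hh⟩ | ⟨rfl, hh⟩ | ⟨rfl, hh⟩ | ⟨rfl, hh⟩ | ⟨rfl, hh⟩ | ⟨rfl, hh⟩ | ⟨rfl, hh⟩ | ⟨rfl, hh⟩ | ⟨rfl, hh⟩ | ⟨rfl, hh⟩ | ⟨rfl, hh⟩) <;> simp_all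
      unfold classify_sensitive_file_py_alt
      rw [pv_min_eq p c 6 hmem hlb]
      rfl
  | false =>
      rw [if_neg (by decide)]
      exact pv_eqR7 p c h0 h1 h2 h3 h4 h5 h6

theorem pv_eqR5 (p c : String) (h0 : pvP0 p c = false) (h1 : pvP1 p c = false) (h2 : pvP2 p = false) (h3 : pvP3 p c = false) (h4 : pvP4 p c = false) :
    pvA_step6 p c = classify_sensitive_file_py_alt p c := by
  rw [pvA_step6_eq]
  cases h5 : pvP5 p with
  | true =>
      rw [if_pos rfl]
      have hmem : (5 : Nat) ∈ pvCands p c := by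
        rw [pv_cands_eq]
        simp [List.mem_append, h5, h0, h1, h2, h3, h4]
      have hlb : ∀ x ∈ pvCands p c, (5 : Nat) ≤ x := by
        intro x hx
        rcases pv_cands_mem p c x hx with (⟨rfl, hh⟩ | ⟨rfl, hh⟩ | ⟨rfl, hh⟩ | ⟨rfl, hh⟩ | ⟨rfl, hh⟩ | ⟨rfl, hh⟩ | ⟨rfl, hh⟩ | ⟨rfl, hh⟩ | ⟨rfl, hh⟩ | ⟨rfl, hh⟩ | ⟨rfl, hh⟩ | ⟨rfl, hh⟩ | ⟨rfl, hh⟩ | ⟨rfl, hh⟩ | ⟨rfl, hh⟩) <;> simp_all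
      unfold classify_sensitive_file_py_alt
      rw [pv_min_eq p c 5 hmem hlb]
      rfl
  | false =>
      rw [if_neg (by decide)]
      exact pv_eqR6 p c h0 h1 h2 h3 h4 h5

theorem pv_eqR4 (p c : String) (h0 : pvP0 p c = false) (h1 : pvP1 p c = false) (h2 : pvP2 p = false) (h3 : pvP3 p c = false) :
    pvA_step5 p c = classify_sensitive_file_py_alt p c := by
  rw [pvA_step5_eq]
  cases h4 : pvP4 p c with
  | true =>
      rw [if_pos rfl]
      have hmem : (4 : Nat) ∈ pvCands p c := by
        rw [pv_cands_eq]
        simp [List.mem_append, h4, h0, h1, h2, h3]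
      have hlb : ∀ x ∈ pvCands p c, (4 : Nat) ≤ x := by
        intro x hx
        rcases pv_cands_mem p c x hx with (⟨rfl, hh⟩ | ⟨rfl, hh⟩ | ⟨rfl, hh⟩ | ⟨rfl, hh⟩ | ⟨rfl, hh⟩ | ⟨rfl, hh⟩ | ⟨rfl, hh⟩ | ⟨rfl, hh⟩ | ⟨rfl, hh⟩ | ⟨rfl, hh⟩ | ⟨rfl, hh⟩ | ⟨rfl, hh⟩ | ⟨rfl, hh⟩ | ⟨rfl, hh⟩ | ⟨rfl, hh⟩) <;> simp_all
      unfold classify_sensitive_file_py_alt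
      rw [pv_min_eq p c 4 hmem hlb]
      rfl
  | false =>
      rw [if_neg (by decide)]
      exact pv_eqR5 p c h0 h1 h2 h3 h4

theorem pv_eqR3 (p c : String) (h0 : pvP0 p c = false) (h1 : pvP1 p c = false) (h2 : pvP2 p = false) :
    pvA_step4 p c = classify_sensitive_file_py_alt p c := by
  rw [pvA_step4_eq]
  cases h3 : pvP3 p c with
  | true =>
      rw [if_pos rfl]
      have hmem : (3 : Nat) ∈ pvCands p c := by
        rw [pv_cands_eq]
        simp [List.mem_append, h3, h0, h1, h2]
      have hlb : ∀ x ∈ pvCands p c, (3 : Nat) ≤ x := by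
        intro x hx
        rcases pv_cands_mem p c x hx with (⟨rfl, hh⟩ | ⟨rfl, hh⟩ | ⟨rfl, hh⟩ | ⟨rfl, hh⟩ | ⟨rfl, hh⟩ | ⟨rfl, hh⟩ | ⟨rfl, hh⟩ | ⟨rfl, hh⟩ | ⟨rfl, hh⟩ | ⟨rfl, hh⟩ | ⟨rfl, hh⟩ | ⟨rfl, hh⟩ | ⟨rfl, hh⟩ | ⟨rfl, hh⟩ | ⟨rfl, hh⟩) <;> simp_all
      unfold classify_sensitive_file_py_alt
      rw [pv_min_eq p c 3 hmem hlb]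
      rfl
  | false =>
      rw [if_neg (by decide)]
      exact pv_eqR4 p c h0 h1 h2 h3

theorem pv_eqR1 (p c : String) (h0 : pvP0 p c = false) :
    pvA_step3 p c = classify_sensitive_file_py_alt p c := by
  rw [pvA_step3_eq]
  cases h1 : pvP1 p c with
  | true =>
      rw [if_pos rfl]
      have hmem : (1 : Nat) ∈ pvCands p c := by
        rw [pv_cands_eq]
        simp [List.mem_append, h1, h0]
      have hlb : ∀ x ∈ pvCands p c, (1 : Nat) ≤ x := by
        intro x hx
        rcases pv_cands_mem p c x hx with (⟨rfl, hh⟩ | ⟨rfl, hh⟩ | ⟨rfl, hh⟩ | ⟨rfl, hh⟩ | ⟨rfl, hh⟩ | ⟨rfl, hh⟩ | ⟨rfl, hh⟩ | ⟨rfl, hh⟩ | ⟨rfl, hh⟩ | ⟨rfl, hh⟩ | ⟨rfl, hh⟩ | ⟨rfl, hh⟩ | ⟨rfl, hh⟩ | ⟨rfl, hh⟩ | ⟨rfl, hh⟩) <;> simp_all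
      unfold classify_sensitive_file_py_alt
      rw [pv_min_eq p c 1 hmem hlb]
      rfl
  | false =>
      cases h2 : pvP2 p with
      | true =>
          rw [if_neg (by decide), if_pos rfl]
          have hmem : (2 : Nat) ∈ pvCands p c := by
            rw [pv_cands_eq]
            simp [List.mem_append, h2, h0, h1]
          have hlb : ∀ x ∈ pvCands p c, (2 : Nat) ≤ x := by
            intro x hx
            rcases pv_cands_mem p c x hx with (⟨rfl, hh⟩ | ⟨rfl, hh⟩ | ⟨rfl, hh⟩ | ⟨rfl, hh⟩ | ⟨rfl, hh⟩ | ⟨rfl, hh⟩ | ⟨rfl, hh⟩ | ⟨rfl, hh⟩ | ⟨rfl, hh⟩ | ⟨rfl, hh⟩ | ⟨rfl, hh⟩ | ⟨rfl, hh⟩ | ⟨rfl, hh⟩ | ⟨rfl, hh⟩ | ⟨rfl, hh⟩) <;> simp_all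
          unfold classify_sensitive_file_py_alt
          rw [pv_min_eq p c 2 hmem hlb]
          rfl
      | false =>
          rw [if_neg (by decide), if_neg (by decide)]
          exact pv_eqR3 p c h0 h1 h2

theorem pv_eqR0 (p c : String)  :
    pvA_step1 p c = classify_sensitive_file_py_alt p c := by
  rw [pvA_step1_eq]
  cases h0 : pvP0 p c with
  | true =>
      rw [if_pos rfl]
      have hmem : (0 : Nat) ∈ pvCands p c := by
        rw [pv_cands_eq]
        simp [List.mem_append, h0]
      have hlb : ∀ x ∈ pvCands p c, (0 : Nat) ≤ x := by
        intro x hx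
        rcases pv_cands_mem p c x hx with (⟨rfl, hh⟩ | ⟨rfl, hh⟩ | ⟨rfl, hh⟩ | ⟨rfl, hh⟩ | ⟨rfl, hh⟩ | ⟨rfl, hh⟩ | ⟨rfl, hh⟩ | ⟨rfl, hh⟩ | ⟨rfl, hh⟩ | ⟨rfl, hh⟩ | ⟨rfl, hh⟩ | ⟨rfl, hh⟩ | ⟨rfl, hh⟩ | ⟨rfl, hh⟩ | ⟨rfl, hh⟩) <;> simp_all
      unfold classify_sensitive_file_py_alt
      rw [pv_min_eq p c 0 hmem hlb]
      rfl
  | false =>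
      rw [if_neg (by decide)]
      exact pv_eqR1 p c h0


-- ===== VERDICT (by name: the statement is the Claim_ definition above) =====
theorem classify_sensitive_file_py_spec : Claim_equal_classify_sensitive_file_py := by
  intro path content _
  unfold Spec_classify_sensitive_file_py classify_sensitive_file_py
  exact pv_eqR0 path content
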